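-- pv_equiv track=rewrite | github.com/Klaudia1303/student_code_analysis | Progetto-tirocinio2024/data/student_data/2080710_Pelorossi/LabPython07/A_Ex7.py | A_Ex7
-- ===== SOURCE A (Python) =====
-- def A_Ex7(s):
--     l=[]
--     i=0
--     if len(s)==0:
--         return l
--     for i in range(len(s)):
--         x=s[i]
--         if ord(x)>=65 and ord(x)<=90:
--             l.append(x)
--             l.sort()
--             for i in range(len(l)-1):
--                 if l[i]==l[i+1]:
--                     l.remove(l[i])
--                     y=len(l)
--                     if l[y-2]!=l[y-1]:
--                         break
--     return l
--
--
--
--     """MODIFICARE IL CONTENUTO DI QUESTA FUNZIONE PER SVOLGERE L'ESERCIZIO"""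
-- ===== SOURCE B (Python) =====
-- def A_Ex7(s):
--     return [c for c in map(chr, range(65, 91)) if c in s]
-- ===== Notes on version B (the rewrite author's own statement) =====
-- stated objective: simpler
-- what changed: B iterates once over the fixed 26-letter uppercase alphabet in increasing order, keeping each letter that occurs in s, so A's scan of s with repeated sorting and adjacent-duplicate removal disappears; the result is sorted and distinct by construction.
import Mathlib
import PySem

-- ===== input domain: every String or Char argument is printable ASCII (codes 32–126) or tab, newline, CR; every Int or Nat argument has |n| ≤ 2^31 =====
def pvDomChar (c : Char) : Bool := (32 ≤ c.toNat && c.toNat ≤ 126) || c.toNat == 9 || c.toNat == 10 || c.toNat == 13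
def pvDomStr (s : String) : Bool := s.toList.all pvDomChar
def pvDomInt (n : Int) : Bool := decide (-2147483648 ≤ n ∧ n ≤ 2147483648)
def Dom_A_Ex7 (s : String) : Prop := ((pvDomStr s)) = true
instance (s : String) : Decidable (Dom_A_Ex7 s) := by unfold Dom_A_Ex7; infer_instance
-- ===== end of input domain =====

-- B replaces A's scan-sort-dedup with one ordered pass over the fixed alphabet 'A'..'Z', testing membership in s (simpler).


-- ===== PORT A =====
-- inner dedup loop: 'for i in range(len(l)-1): if l[i]==l[i+1]: l.remove(l[i]); y=len(l); if l[y-2]!=l[y-1]: break'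
-- the catch-all '_, _ => …' arms are totality guards for IndexError/ValueError, which Python never reaches on the states A builds
def innerA (l : List String) (idxs : List Int) : List String :=
  match idxs with
  | [] => l
  | i :: rest =>
    match PySem.List.pyGet? l i, PySem.List.pyGet? l (i+1) with
    | some a, some b =>
      if a == b then
        match PySem.List.remove? l a with
        | some l2 =>
          let y : Int := (l2.length : Int)
          match PySem.List.pyGet? l2 (y-2), PySem.List.pyGet? l2 (y-1) with
          | some u, some v => if u ≠ v then l2 else innerA l2 rest
          | _, _ => l2
        | none => l
      else innerA l rest
    | _, _ => l

def outerA : List Char → List String → List String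
  | [], l => l
  | x :: xs, l =>
    if 65 ≤ x.toNat ∧ x.toNat ≤ 90 then
      let l1 := PySem.List.sorted (l ++ [String.ofList [x]]) (fun t => t) false
      outerA xs (innerA l1 (PySem.List.pyRange 0 ((l1.length : Int) - 1) 1))
    else outerA xs l

def A_Ex7 (s : String) : List String :=
  if PySem.Str.len s = 0 then [] else outerA s.toList []

-- ===== PORT B =====
-- [c for c in map(chr, range(65, 91)) if c in s]
def A_Ex7_alt (s : String) : List String :=
  ((PySem.List.pyRange 65 91 1).map (fun k => String.ofList [Char.ofNat k.toNat])).filter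
    (fun c => PySem.Str.isIn c s)

-- ===== PRECONDITION & SPEC =====
def Spec_A_Ex7 (s : String) (out : List String) : Prop := out = A_Ex7_alt s
instance (s : String) (out : List String) : Decidable (Spec_A_Ex7 s out) := by unfold Spec_A_Ex7; infer_instance

-- ===== CLAIM (what is proved, stated in full; the proofs are below) =====
def Claim_equal_A_Ex7 : Prop := ∀ (s : String), Dom_A_Ex7 s → Spec_A_Ex7 s (A_Ex7 s)

-- ===== LEMMAS AND PROOFS =====
lemma singlt (a b : Char) : ([a] : List Char) < [b] ↔ a < b := by
  constructor
  · intro h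
    cases h with
    | cons h => cases h
    | rel h => exact h
  · exact fun h => List.Lex.rel h

def chStr (c : Char) : String := String.ofList [c]

lemma chStr_lt (a b : Char) : chStr a < chStr b ↔ a < b := by
  simp only [chStr, String.lt_iff_toList_lt, String.toList_ofList]
  exact singlt a b

lemma pairwise_le_dup (u v : List String) (a : String) (h : (u ++ a :: v).Pairwise (· < ·)) :
    (u ++ a :: a :: v).Pairwise (· ≤ ·) := by
  simp only [List.pairwise_append, List.pairwise_cons, List.mem_cons] at h ⊢
  obtain ⟨hu, ⟨hav, hv⟩, hcross⟩ := h
  refine ⟨hu.imp (fun h => le_of_lt h), ⟨?_, ?_, hv.imp (fun h => le_of_lt h)⟩, ?_⟩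
  · rintro b hb
    rcases hb with rfl | hb
    · exact le_refl b
    · exact le_of_lt (hav b hb)
  · exact fun b hb => le_of_lt (hav b hb)
  · rintro x hx y hy
    rcases hy with rfl | rfl | hy
    · exact le_of_lt (hcross x hx y (Or.inl rfl))
    · exact le_of_lt (hcross x hx y (Or.inl rfl))
    · exact le_of_lt (hcross x hx y (Or.inr hy))

lemma sorted_insert_new (u v : List String) (a : String) (h : (u ++ a :: v).Pairwise (· < ·)) :
    PySem.List.sorted ((u ++ v) ++ [a]) (fun t => t) false = u ++ a :: v := by
  refine PySem.List.sorted_eq_of_perm_of_pairwise_lt _ _ _ ?_ h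
  have h1 : (v ++ [a]).Perm (a :: v) := List.perm_append_singleton a v
  have h2 : (u ++ (a :: v)).Perm (u ++ (v ++ [a])) := h1.symm.append_left u
  exact ((List.append_assoc u v [a]).symm ▸ h2 : (u ++ a :: v).Perm ((u ++ v) ++ [a]))

lemma sorted_insert_dup (u v : List String) (a : String) (h : (u ++ a :: v).Pairwise (· < ·)) :
    PySem.List.sorted ((u ++ a :: v) ++ [a]) (fun t => t) false = u ++ a :: a :: v := by
  refine List.Perm.eq_of_pairwise (fun a b _ _ h1 h2 => le_antisymm h1 h2)
    (PySem.List.sorted_pairwise _ _) (pairwise_le_dup u v a h) ?_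
  have h1 : (PySem.List.sorted ((u ++ a :: v) ++ [a]) (fun t => t) false).Perm ((u ++ a :: v) ++ [a]) :=
    PySem.List.sorted_perm _ _ _
  have h2 : ((a :: v) ++ [a]).Perm (a :: a :: v) := (List.perm_append_singleton a v).cons a
  have h3 : (u ++ ((a :: v) ++ [a])).Perm (u ++ (a :: a :: v)) := h2.append_left u
  have h4 : (u ++ a :: v) ++ [a] = u ++ ((a :: v) ++ [a]) := List.append_assoc u (a :: v) [a]
  exact h1.trans (h4 ▸ h3)

def upAlpha : List Char := (PySem.List.pyRange 65 91 1).map (fun k => Char.ofNat k.toNat)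

def ups (p : List Char) : List String := (upAlpha.filter (fun c => p.contains c)).map chStr

lemma upAlpha_pairwise : upAlpha.Pairwise (fun a b => chStr a < chStr b) := by
  have h : upAlpha.Pairwise (· < ·) := by decide
  exact h.imp (fun hab => (chStr_lt _ _).mpr hab)

lemma upAlpha_nodup : upAlpha.Nodup := by
  have h : upAlpha.Pairwise (· < ·) := by decide
  exact h.imp (fun hab => ne_of_lt hab)

lemma upAlpha_bounds : ∀ c ∈ upAlpha, 65 ≤ c.toNat ∧ c.toNat ≤ 90 := by
  have h : (upAlpha.all fun c => decide (65 ≤ c.toNat) && decide (c.toNat ≤ 90)) = true := by decide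
  intro c hc
  have := List.all_eq_true.mp h c hc
  simp at this; exact this

lemma mem_upAlpha (x : Char) (h1 : 65 ≤ x.toNat) (h2 : x.toNat ≤ 90) : x ∈ upAlpha := by
  unfold upAlpha
  refine List.mem_map.mpr ⟨(x.toNat : Int), ?_, ?_⟩
  · rw [PySem.List.mem_pyRange_one]; omega
  · simp only [Int.toNat_natCast]
    exact Char.ofNat_toNat x

lemma ups_pairwise (p : List Char) : (ups p).Pairwise (· < ·) := by
  unfold ups
  exact List.pairwise_map.mpr ((List.Pairwise.filter _ upAlpha_pairwise))

lemma contains_snoc (p : List Char) (x c : Char) (hne : c ≠ x) :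
    (p ++ [x]).contains c = p.contains c := by
  simp [hne]

lemma ups_snoc_notup (p : List Char) (x : Char) (hx : ¬ (65 ≤ x.toNat ∧ x.toNat ≤ 90)) :
    ups (p ++ [x]) = ups p := by
  unfold ups
  congr 1
  refine List.filter_congr (fun c hc => ?_)
  have hb := upAlpha_bounds c hc
  exact contains_snoc p x c (fun hcx => hx (hcx ▸ hb))

lemma pairwise_suffix_get_ne (w : List String) (hw : w.Pairwise (· < ·)) (k : Nat)
    (hk : k + 1 < w.length) : w[k] ≠ w[k+1] :=
  ne_of_lt (List.pairwise_iff_getElem.mp hw _ _ (by omega) hk (by omega))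

lemma innerA_nodup : ∀ (idxs : List Int) (l : List String), l.Pairwise (· < ·) →
    (∀ i ∈ idxs, 0 ≤ i ∧ i + 1 < (l.length : Int)) → innerA l idxs = l
  | [], l, _, _ => rfl
  | i :: rest, l, hl, hr => by
    obtain ⟨h0, h1⟩ := hr i (List.mem_cons_self ..)
    obtain ⟨n, rfl⟩ : ∃ n : Nat, i = (n : Int) := ⟨i.toNat, (Int.toNat_of_nonneg h0).symm⟩
    have hlt : n + 1 < l.length := by omega
    have hg1 : PySem.List.pyGet? l (n : Int) = some l[n] := by
      rw [PySem.List.pyGet?_natCast, List.getElem?_eq_getElem (by omega)]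
    have hg2 : PySem.List.pyGet? l ((n : Int)+1) = some l[n + 1] := by
      rw [show ((n:Int)+1) = ((n + 1 : Nat) : Int) by omega, PySem.List.pyGet?_natCast,
        List.getElem?_eq_getElem hlt]
    have hne : l[n] ≠ l[n + 1] :=
      ne_of_lt (List.pairwise_iff_getElem.mp hl _ _ (by omega) hlt (by omega))
    rw [innerA, hg1, hg2]
    simp only [beq_eq_false_iff_ne.mpr hne, Bool.false_eq_true, if_false]
    exact innerA_nodup rest l hl (fun j hj => hr j (List.mem_cons_of_mem _ hj))

lemma innerA_dedup_aux (u v : List String) (a : String) (h : (u ++ a :: v).Pairwise (· < ·)) :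
    ∀ (m j : Nat), j + m = u.length →
    innerA (u ++ a :: a :: v) (PySem.List.pyRange (j : Int) ((u.length : Int) + (v.length : Int) + 1) 1)
      = u ++ a :: v := by
  have hgetL : ∀ k : Nat, k ≤ u.length → (u ++ a :: a :: v)[k]? = (u ++ a :: v)[k]? := by
    intro k hk
    rcases Nat.lt_or_ge k u.length with hk' | hk'
    · rw [List.getElem?_append_left hk', List.getElem?_append_left hk']
    · have hke : k = u.length := le_antisymm hk hk'
      subst hke
      rw [List.getElem?_append_right (le_refl _), List.getElem?_append_right (le_refl _)]
      simp
  intro m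
  induction m with
  | zero =>
    intro j hj
    have hj' : j = u.length := by omega
    subst hj'
    have hjn : ((u.length : Nat) : Int) < (u.length : Int) + (v.length : Int) + 1 := by omega
    rw [PySem.List.pyRange_one_cons hjn, innerA]
    have hg1 : PySem.List.pyGet? (u ++ a :: a :: v) ((u.length : Nat) : Int) = some a := by
      rw [PySem.List.pyGet?_natCast, List.getElem?_append_right (le_refl _)]
      simp
    have hg2 : PySem.List.pyGet? (u ++ a :: a :: v) (((u.length : Nat) : Int) + 1) = some a := by
      rw [show ((u.length : Int) + 1) = ((u.length + 1 : Nat) : Int) by omega,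
        PySem.List.pyGet?_natCast, List.getElem?_append_right (by omega)]
      simp
    have hanu : a ∉ u := by
      intro ha
      exact absurd ((List.pairwise_append.mp h).2.2 a ha a (List.mem_cons_self ..)) (lt_irrefl a)
    have hrm : PySem.List.remove? (u ++ a :: a :: v) a = some (u ++ a :: v) := by
      rw [PySem.List.remove?_eq_some_erase _ a (by simp)]
      rw [List.erase_append_right _ hanu, List.erase_cons_head]
    rw [hg1, hg2]
    simp only [BEq.rfl, if_true, hrm]
    rcases Nat.eq_zero_or_pos (u.length + v.length) with hz | hpos
    · have hu : u = [] := List.length_eq_zero_iff.mp (by omega)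
      have hv : v = [] := List.length_eq_zero_iff.mp (by omega)
      subst hu; subst hv
      rw [PySem.List.pyRange_one_eq_nil (by omega)]
      simp [innerA, PySem.List.pyGet?, PySem.List.pyIdx?]
    · have hN : (u ++ a :: v).length = u.length + v.length + 1 := by simp; omega
      have hg3 : PySem.List.pyGet? (u ++ a :: v) (((u ++ a :: v).length : Int) - 2)
          = some ((u ++ a :: v)[u.length + v.length - 1]'(by rw [List.length_append, List.length_cons]; omega)) := by
        rw [show (((u ++ a :: v).length : Int) - 2) = ((u.length + v.length - 1 : Nat) : Int) by omega,
          PySem.List.pyGet?_natCast, List.getElem?_eq_getElem (by omega)]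
      have hg4 : PySem.List.pyGet? (u ++ a :: v) (((u ++ a :: v).length : Int) - 1)
          = some ((u ++ a :: v)[u.length + v.length]'(by rw [List.length_append, List.length_cons]; omega)) := by
        rw [show (((u ++ a :: v).length : Int) - 1) = ((u.length + v.length : Nat) : Int) by omega,
          PySem.List.pyGet?_natCast, List.getElem?_eq_getElem (by omega)]
      have hne : (u ++ a :: v)[u.length + v.length - 1]'(by rw [List.length_append, List.length_cons]; omega) ≠ (u ++ a :: v)[u.length + v.length]'(by rw [List.length_append, List.length_cons]; omega) := by
        have := pairwise_suffix_get_ne _ h (u.length + v.length - 1) (by omega)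
        simpa [show u.length + v.length - 1 + 1 = u.length + v.length by omega] using this
      rw [hg3, hg4]
      simp only [ne_eq, hne, not_false_eq_true, if_true]
  | succ m ih =>
    intro j hj
    have hjn : (j : Int) < (u.length : Int) + (v.length : Int) + 1 := by omega
    rw [PySem.List.pyRange_one_cons hjn, innerA]
    have hlt : j + 1 < (u ++ a :: v).length := by simp; omega
    have hj1 : j < (u ++ a :: v).length := by simp at hlt ⊢; omega
    have hg1 : PySem.List.pyGet? (u ++ a :: a :: v) (j : Int) = some (u ++ a :: v)[j] := by
      rw [PySem.List.pyGet?_natCast, hgetL j (by omega), List.getElem?_eq_getElem hj1]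
    have hg2 : PySem.List.pyGet? (u ++ a :: a :: v) ((j : Int) + 1) = some (u ++ a :: v)[j+1] := by
      rw [show ((j:Int)+1) = ((j + 1 : Nat) : Int) by omega, PySem.List.pyGet?_natCast,
        hgetL (j+1) (by omega), List.getElem?_eq_getElem hlt]
    have hne : (u ++ a :: v)[j] ≠ (u ++ a :: v)[j+1] := pairwise_suffix_get_ne _ h j hlt
    rw [hg1, hg2]
    simp only [beq_eq_false_iff_ne.mpr hne, Bool.false_eq_true, if_false]
    rw [show ((j:Int)+1) = ((j + 1 : Nat) : Int) by omega]
    exact ih (j+1) (by omega)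

lemma ups_snoc_up (p : List Char) (x : Char) (hx : 65 ≤ x.toNat ∧ x.toNat ≤ 90) :
    ∃ U V : List String,
      ups p = (if p.contains x then U ++ chStr x :: V else U ++ V) ∧
      ups (p ++ [x]) = U ++ chStr x :: V := by
  obtain ⟨A1, A2, hsplit⟩ := List.append_of_mem (mem_upAlpha x hx.1 hx.2)
  have hnd : upAlpha.Nodup := upAlpha_nodup
  rw [hsplit] at hnd
  have hx1 : x ∉ A1 := by
    simp [List.nodup_append] at hnd
    intro h; exact (hnd.2.2 x h).1 rfl
  have hx2 : x ∉ A2 := by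
    simp [List.nodup_append] at hnd
    exact hnd.2.1.1
  refine ⟨(A1.filter (fun c => p.contains c)).map chStr, (A2.filter (fun c => p.contains c)).map chStr, ?_, ?_⟩
  · unfold ups
    rw [hsplit, List.filter_append, List.filter_cons, List.map_append]
    by_cases hc : p.contains x
    · rw [if_pos hc, if_pos hc]; simp
    · rw [if_neg hc, if_neg hc]
  · unfold ups
    rw [hsplit, List.filter_append, List.filter_cons]
    have e1 : A1.filter (fun c => (p ++ [x]).contains c) = A1.filter (fun c => p.contains c) :=
      List.filter_congr (fun c hc => contains_snoc p x c (fun hcx => hx1 (hcx ▸ hc)))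
    have e2 : A2.filter (fun c => (p ++ [x]).contains c) = A2.filter (fun c => p.contains c) :=
      List.filter_congr (fun c hc => contains_snoc p x c (fun hcx => hx2 (hcx ▸ hc)))
    have e3 : (p ++ [x]).contains x = true := by simp
    rw [e1, e2, e3, if_pos rfl]
    simp

lemma outer_step (p : List Char) (x : Char) (hx : 65 ≤ x.toNat ∧ x.toNat ≤ 90) :
    innerA (PySem.List.sorted (ups p ++ [chStr x]) (fun t => t) false)
      (PySem.List.pyRange 0
        (((PySem.List.sorted (ups p ++ [chStr x]) (fun t => t) false).length : Int) - 1) 1)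
      = ups (p ++ [x]) := by
  obtain ⟨U, V, hup, hnew⟩ := ups_snoc_up p x hx
  have hw : (U ++ chStr x :: V).Pairwise (· < ·) := hnew ▸ ups_pairwise (p ++ [x])
  rw [hnew]
  by_cases hc : p.contains x
  · rw [hup, if_pos hc, sorted_insert_dup U V (chStr x) hw]
    have hl : (((U ++ chStr x :: chStr x :: V).length : Int) - 1)
        = (U.length : Int) + (V.length : Int) + 1 := by simp; omega
    rw [hl, show (0 : Int) = ((0 : Nat) : Int) from rfl]
    exact innerA_dedup_aux U V (chStr x) hw U.length 0 (by omega)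
  · rw [hup, if_neg hc, sorted_insert_new U V (chStr x) hw]
    refine innerA_nodup _ _ hw (fun i hi => ?_)
    rw [PySem.List.mem_pyRange_one] at hi
    constructor
    · exact hi.1
    · have := hi.2; simp at this ⊢; omega

lemma outer_inv (cs : List Char) : ∀ p, outerA cs (ups p) = ups (p ++ cs) := by
  induction cs with
  | nil => intro p; simp [outerA]
  | cons x xs ih =>
    intro p
    by_cases hx : 65 ≤ x.toNat ∧ x.toNat ≤ 90
    · show (if 65 ≤ x.toNat ∧ x.toNat ≤ 90 then
        let l1 := PySem.List.sorted (ups p ++ [String.ofList [x]]) (fun t => t) false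
        outerA xs (innerA l1 (PySem.List.pyRange 0 ((l1.length : Int) - 1) 1))
      else outerA xs (ups p)) = ups (p ++ x :: xs)
      rw [if_pos hx]
      show outerA xs (innerA _ _) = _
      rw [show String.ofList [x] = chStr x from rfl, outer_step p x hx, ih (p ++ [x])]
      simp
    · show (if 65 ≤ x.toNat ∧ x.toNat ≤ 90 then
        let l1 := PySem.List.sorted (ups p ++ [String.ofList [x]]) (fun t => t) false
        outerA xs (innerA l1 (PySem.List.pyRange 0 ((l1.length : Int) - 1) 1))
      else outerA xs (ups p)) = ups (p ++ x :: xs)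
      rw [if_neg hx, ← ups_snoc_notup p x hx, ih (p ++ [x])]
      simp

lemma isIn_single (c : Char) (s : String) : PySem.Str.isIn (chStr c) s = s.toList.contains c := by
  rw [Bool.eq_iff_iff, PySem.Str.isIn_iff_infix]
  simp [chStr, List.singleton_infix_iff]

lemma alt_eq_ups (s : String) : A_Ex7_alt s = ups s.toList := by
  unfold A_Ex7_alt ups upAlpha
  rw [show (fun k : Int => String.ofList [Char.ofNat k.toNat])
      = chStr ∘ (fun k : Int => Char.ofNat k.toNat) from rfl]
  rw [← List.map_map, List.filter_map]
  congr 1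
  exact List.filter_congr (fun c hc => isIn_single c s)

-- ===== VERDICT (by name: the statement is the Claim_ definition above) =====
theorem A_Ex7_spec : Claim_equal_A_Ex7 := by
  intro s _
  unfold Spec_A_Ex7
  rw [alt_eq_ups]
  unfold A_Ex7
  have h0 : ups ([] : List Char) = [] := by simp [ups]
  by_cases h : PySem.Str.len s = 0
  · rw [if_pos h]
    have hnil : s.toList = [] := by
      have hl := PySem.Str.len_eq s
      rw [h] at hl
      exact List.length_eq_zero_iff.mp (by omega)
    rw [hnil, h0]
  · rw [if_neg h]
    calc outerA s.toList [] = outerA s.toList (ups []) := by rw [h0]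
      _ = ups ([] ++ s.toList) := outer_inv s.toList []
      _ = ups s.toList := by simp
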